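-- pv_equiv track=rewrite | github.com/Charly98cma/GoogleFoobar | Level2/Problem2/lovely-lucky-lambs.py | generous
-- ===== SOURCE A (Python) =====
-- from itertools import count
--
-- def generous(n):
--     """
--     Sequence of power 2 numbers until all LAMBs
--     are assigned.
--
--     Special case: the remaining LAMBs are less that
--     the next power of 2, but greater that the sum of
--     the pay of the two last subordinates.
--     """
--     sum_seq = 1
--     seq = []
--     for i in count():
--         if sum_seq > n:
--             break
--         seq.append(sum_seq)
--         sum_seq <<= 1
--     seq = seq[:-1]
--     return i if n-sum(seq) > sum(seq[-2:]) else i-1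
-- ===== SOURCE B (Python) =====
-- def generous(n):
--     if n < 1:
--         return -1
--     m = n.bit_length() - 1
--     remaining = n - ((1 << m) - 1)
--     last_two = sum(1 << j for j in range(max(m - 2, 0), m))
--     return m + 1 if remaining > last_two else m
-- ===== Notes on version B (the rewrite author's own statement) =====
-- stated objective: simpler
-- what changed: Replaces A's iterative powers-of-two accumulation loop (building, slicing and summing a list of payments) with direct arithmetic from the bit length of n: the base cost and the sum of the final payments are computed from the exponent, with no accumulation loop.
import Mathlib
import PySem

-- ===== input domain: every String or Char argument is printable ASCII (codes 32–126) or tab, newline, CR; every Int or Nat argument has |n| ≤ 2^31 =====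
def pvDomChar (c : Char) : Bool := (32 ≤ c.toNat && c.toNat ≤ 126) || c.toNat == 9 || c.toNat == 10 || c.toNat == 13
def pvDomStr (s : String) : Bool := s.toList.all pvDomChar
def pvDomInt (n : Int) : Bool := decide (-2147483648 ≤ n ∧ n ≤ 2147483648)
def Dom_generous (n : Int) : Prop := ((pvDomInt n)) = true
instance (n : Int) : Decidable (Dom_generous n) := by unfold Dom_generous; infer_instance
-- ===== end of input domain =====

-- B replaces A's power-of-two accumulation loop (and payment-list building) with direct arithmetic from the bit length; loop-free and shorter.

-- ===== PORT A =====
-- A's `for i in count(): if sum_seq > n: break; seq.append(sum_seq); sum_seq <<= 1`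
-- as structural recursion on the same state (s = sum_seq, i = loop counter, seq);
-- terminates because s doubles each step while 1 ≤ s.
def generousLoop (n : Int) (s : Int) (hs : 1 ≤ s) (i : Int) (seq : List Int) : Int × List Int :=
  if s > n then (i, seq)
  else generousLoop n (s * 2) (by omega) (i + 1) (seq ++ [s])
termination_by (n + 1 - s).toNat
decreasing_by omega

def generous (n : Int) : Int :=
  let r := generousLoop n 1 (by norm_num) 0 []
  let seq := r.2.dropLast                                   -- seq = seq[:-1]
  let lastTwo := (seq.drop (seq.length - 2)).sum            -- sum(seq[-2:])
  if n - seq.sum > lastTwo then r.1 else r.1 - 1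

-- ===== PORT B =====
-- transliteration of Source B; `n.bit_length() - 1` (for n ≥ 1) is Nat.log2 n.toNat,
-- `1 << j` is 2 ^ j, and range(max(m-2,0), m) is List.range' (m-2) (m-(m-2))
-- (Nat subtraction gives the max with 0).
def generous_alt (n : Int) : Int :=
  if n < 1 then -1
  else
    let m : Nat := Nat.log2 n.toNat
    let remaining : Int := n - (2 ^ m - 1)
    let lastTwo : Int := ((List.range' (m - 2) (m - (m - 2))).map (fun j => (2 : Int) ^ j)).sum
    if remaining > lastTwo then (m : Int) + 1 else (m : Int)

-- ===== PRECONDITION & SPEC =====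
def Spec_generous (n : Int) (out : Int) : Prop := out = generous_alt n
instance (n : Int) (out : Int) : Decidable (Spec_generous n out) := by unfold Spec_generous; infer_instance

-- ===== CLAIM (what is proved, stated in full; the proofs are below) =====
def Claim_equal_generous : Prop := ∀ (n : Int), Dom_generous n → Spec_generous n (generous n)

-- ===== LEMMAS AND PROOFS =====

-- [1, 2, 4, …, 2^(j-1)] : the seq A has built after j iterations
def powList (j : Nat) : List Int := (List.range j).map (fun p => (2 : Int) ^ p)

theorem powList_succ (j : Nat) : powList (j + 1) = powList j ++ [(2 : Int) ^ j] := by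
  simp [powList, List.range_succ]

theorem powList_sum (j : Nat) : (powList j).sum = 2 ^ j - 1 := by
  induction j with
  | zero => simp [powList]
  | succ j ih => rw [powList_succ]; simp [ih]; ring

theorem powList_length (j : Nat) : (powList j).length = j := by
  simp [powList]

theorem powList_take (i j : Nat) (h : i ≤ j) : (powList j).take i = powList i := by
  simp [powList, ← List.map_take, List.take_range, Nat.min_eq_left h]

theorem generousLoop_step (n s : Int) (hs : 1 ≤ s) (hle : s ≤ n) (i : Int) (seq : List Int)
    (hs2 : 1 ≤ s * 2) :
    generousLoop n s hs i seq = generousLoop n (s * 2) hs2 (i + 1) (seq ++ [s]) := by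
  rw [generousLoop, if_neg (by omega : ¬ s > n)]

theorem generousLoop_break (n s : Int) (hs : 1 ≤ s) (hgt : s > n) (i : Int) (seq : List Int) :
    generousLoop n s hs i seq = (i, seq) := by
  rw [generousLoop, if_pos hgt]

theorem generousLoop_congr (n : Int) {s s' : Int} (h : s = s') (hs : 1 ≤ s) (hs' : 1 ≤ s')
    {i i' : Int} (hi : i = i') {seq seq' : List Int} (hq : seq = seq') :
    generousLoop n s hs i seq = generousLoop n s' hs' i' seq' := by
  subst h; subst hi; subst hq; rfl

theorem generousLoop_run (n : Int) (k : Nat) (hk2 : n < 2 ^ (k + 1)) :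
    ∀ d j, j + d = k → (2 : Int) ^ k ≤ n → ∀ (hp : 1 ≤ (2 : Int) ^ j),
      generousLoop n (2 ^ j) hp (j : Int) (powList j) = ((k : Int) + 1, powList (k + 1)) := by
  intro d
  induction d with
  | zero =>
    intro j hj hk hp
    have hjk : j = k := by omega
    subst hjk
    have h2 : (2 : Int) ^ j * 2 = 2 ^ (j + 1) := by rw [pow_succ]
    calc generousLoop n (2 ^ j) hp (j : Int) (powList j)
        = generousLoop n ((2:Int) ^ j * 2) (by omega) ((j : Int) + 1) (powList j ++ [2 ^ j]) :=
          generousLoop_step n _ hp (by omega) _ _ _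
      _ = generousLoop n ((2:Int) ^ (j + 1)) (by rw [← h2]; omega) ((j : Int) + 1) (powList (j + 1)) :=
          generousLoop_congr n h2 _ _ rfl (powList_succ j).symm
      _ = ((j : Int) + 1, powList (j + 1)) :=
          generousLoop_break n _ _ (by omega) _ _
  | succ d ih =>
    intro j hj hk hp
    have hjlt : (2 : Int) ^ j ≤ 2 ^ k := pow_le_pow_right₀ (by norm_num) (by omega)
    have h2 : (2 : Int) ^ j * 2 = 2 ^ (j + 1) := by rw [pow_succ]
    have hcast1 : (j : Int) + 1 = ((j + 1 : Nat) : Int) := by push_cast; ring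
    calc generousLoop n (2 ^ j) hp (j : Int) (powList j)
        = generousLoop n ((2:Int) ^ j * 2) (by omega) ((j : Int) + 1) (powList j ++ [2 ^ j]) :=
          generousLoop_step n _ hp (by omega) _ _ _
      _ = generousLoop n ((2:Int) ^ (j + 1)) (by rw [← h2]; omega) (((j + 1 : Nat) : Int)) (powList (j + 1)) :=
          generousLoop_congr n h2 _ _ hcast1 (powList_succ j).symm
      _ = ((k : Int) + 1, powList (k + 1)) := ih (j + 1) (by omega) hk _

-- B's "sum of the last two payments" equals 2^k - 2^(k-2) in all cases (k = 0, 1, ≥ 2)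
theorem lastTwo_closed (k : Nat) :
    ((List.range' (k - 2) (k - (k - 2))).map (fun j => (2 : Int) ^ j)).sum
      = (2 : Int) ^ k - 2 ^ (k - 2) := by
  match k with
  | 0 => norm_num
  | 1 => norm_num [List.range']
  | (k' + 2) =>
    have h1 : k' + 2 - 2 = k' := by omega
    have h2 : k' + 2 - k' = 2 := by omega
    rw [h1, h2]
    simp [List.range', pow_succ]
    ring

theorem generous_spec : Claim_equal_generous := by
  intro n _
  unfold Spec_generous
  by_cases hn : n < 1
  · have hloop : generousLoop n 1 (by norm_num) 0 [] = (0, []) := by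
      rw [generousLoop, if_pos (by omega : (1 : Int) > n)]
    simp only [generous, generous_alt, hloop, if_pos hn, List.dropLast_nil, List.sum_nil,
      List.length_nil, List.drop_nil]
    rw [if_neg (by omega : ¬ n - 0 > (0 : Int))]
    norm_num
  · push Not at hn
    set k : Nat := Nat.log2 n.toNat with hk
    have hn0 : n.toNat ≠ 0 := by omega
    have hcast : ((n.toNat : Int)) = n := Int.toNat_of_nonneg (by omega)
    have hk1 : (2 : Int) ^ k ≤ n := by
      have h := Nat.log2_self_le hn0
      have h2 : ((2 ^ k : Nat) : Int) ≤ ((n.toNat : Int)) := by exact_mod_cast h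
      rwa [hcast, Nat.cast_pow] at h2
    have hk2 : n < 2 ^ (k + 1) := by
      have h := Nat.lt_log2_self (n := n.toNat)
      have h2 : ((n.toNat : Int)) < ((2 ^ (k + 1) : Nat) : Int) := by exact_mod_cast h
      rwa [hcast, Nat.cast_pow] at h2
    have hrun : generousLoop n 1 (by norm_num) 0 [] = ((k : Int) + 1, powList (k + 1)) := by
      have h := generousLoop_run n k hk2 k 0 (by omega) hk1 (by norm_num)
      simpa [powList] using h
    have hdrop : ((powList k).drop (k - 2)).sum = (2 : Int) ^ k - 2 ^ (k - 2) := by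
      have h := List.sum_take_add_sum_drop (powList k) (k - 2)
      rw [powList_take (k - 2) k (by omega), powList_sum, powList_sum] at h
      omega
    have hA : generous n =
        if n - ((2 : Int) ^ k - 1) > (2 : Int) ^ k - 2 ^ (k - 2) then (k : Int) + 1 else (k : Int) := by
      simp only [generous, hrun, powList_succ k, List.dropLast_concat, powList_sum,
        powList_length, hdrop]
      split_ifs with hc
      · rfl
      · ring
    have hB : generous_alt n =
        if n - ((2 : Int) ^ k - 1) > (2 : Int) ^ k - 2 ^ (k - 2) then (k : Int) + 1 else (k : Int) := by
      simp only [generous_alt, if_neg (by omega : ¬ n < 1), ← hk, lastTwo_closed]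
    rw [hA, hB]
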